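-- pv_equiv track=rewrite | github.com/fyulingi/RL_project | strategy/mentor.py | mode_counter
-- ===== SOURCE A (Python) =====
-- def mode_counter(lines, modes):
--     count = 0
--     for line in lines:
--         for mode in modes:
--             if line.find(mode) != -1:
--                 count += 1
--                 break
--     return count
-- ===== SOURCE B (Python) =====
-- def mode_counter(lines, modes):
--     remaining = lines
--     for mode in modes:
--         remaining = [line for line in remaining if mode not in line]
--     return len(lines) - len(remaining)
-- ===== Notes on version B (the rewrite author's own statement) =====
-- stated objective: alternative
-- what changed: Inverts the loop nesting: instead of scanning each line over all modes with an inner break, B iterates modes on the outside, successively filtering out the lines not yet matched, and returns len(lines) minus the unmatched remainder.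
import Mathlib
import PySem

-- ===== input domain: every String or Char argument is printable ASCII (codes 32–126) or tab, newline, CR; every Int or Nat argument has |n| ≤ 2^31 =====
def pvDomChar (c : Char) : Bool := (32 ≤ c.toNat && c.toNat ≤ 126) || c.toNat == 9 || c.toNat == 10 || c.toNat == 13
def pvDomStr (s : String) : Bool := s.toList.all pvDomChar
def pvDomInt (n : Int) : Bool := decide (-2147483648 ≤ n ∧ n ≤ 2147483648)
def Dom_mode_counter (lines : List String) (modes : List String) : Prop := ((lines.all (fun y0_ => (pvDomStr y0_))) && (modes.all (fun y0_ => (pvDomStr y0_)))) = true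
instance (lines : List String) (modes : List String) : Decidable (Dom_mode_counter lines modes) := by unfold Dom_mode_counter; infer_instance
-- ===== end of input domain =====

-- B inverts the loop nesting (modes outer, filtering unmatched lines, then len subtraction); objective: alternative.

-- ===== PORT A =====
-- inner 'for mode in modes' loop with break
def mcInner (line : String) : List String → Int → Int
  | [], count => count
  | m :: ms, count =>
      if PySem.Str.find line m ≠ -1 then count + 1 else mcInner line ms count

-- outer 'for line in lines' loop
def mcLoop (modes : List String) : List String → Int → Int
  | [], count => count
  | line :: rest, count => mcLoop modes rest (mcInner line modes count)

def mode_counter (lines : List String) (modes : List String) : Int :=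
  mcLoop modes lines 0

-- ===== PORT B =====
def mode_counter_alt (lines : List String) (modes : List String) : Int :=
  let remaining :=
    modes.foldl (fun rem mode => rem.filter (fun line => !PySem.Str.isIn mode line)) lines
  (lines.length : Int) - (remaining.length : Int)

-- ===== PRECONDITION & SPEC =====
def Spec_mode_counter (lines : List String) (modes : List String) (out : Int) : Prop := out = mode_counter_alt lines modes
instance (lines : List String) (modes : List String) (out : Int) : Decidable (Spec_mode_counter lines modes out) := by unfold Spec_mode_counter; infer_instance

-- ===== CLAIM (what is proved, stated in full; the proofs are below) =====
def Claim_equal_mode_counter : Prop := ∀ (lines : List String) (modes : List String), Dom_mode_counter lines modes → Spec_mode_counter lines modes (mode_counter lines modes)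

-- ===== LEMMAS AND PROOFS =====

-- predicate "no mode occurs in the line"
def mcNone (modes : List String) (line : String) : Bool :=
  modes.all (fun m => !PySem.Str.isIn m line)

theorem mcInner_eq (line : String) (modes : List String) (count : Int) :
    mcInner line modes count = count + (if mcNone modes line then 0 else 1) := by
  induction modes with
  | nil => simp [mcInner, mcNone]
  | cons m ms ih =>
      simp only [mcInner, mcNone, List.all_cons]
      by_cases h : PySem.Chars.find line.toList m.toList = -1
      · have hin : PySem.Chars.isIn m.toList line.toList = false :=
          (PySem.Chars.isIn_eq_false_iff _ _).mpr ((PySem.Chars.find_eq_neg_one_iff _ _).mp h)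
        simp [h, hin, ih, mcNone]
      · have hin : PySem.Chars.isIn m.toList line.toList = true :=
          (PySem.Chars.isIn_iff_infix _ _).mpr ((PySem.Chars.find_ne_neg_one_iff _ _).mp h)
        simp [h, hin]

theorem mcLoop_eq (modes : List String) (lines : List String) (count : Int) :
    mcLoop modes lines count =
      count + (lines.length : Int) - ((lines.filter (mcNone modes)).length : Int) := by
  induction lines generalizing count with
  | nil => simp [mcLoop]
  | cons l rest ih =>
      simp only [mcLoop, ih, mcInner_eq, List.filter_cons, List.length_cons]
      by_cases h : mcNone modes l = true
      · simp [h]; ring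
      · simp [h]; ring

theorem foldl_filter_eq (modes : List String) (xs : List String) :
    modes.foldl (fun rem mode => rem.filter (fun line => !PySem.Str.isIn mode line)) xs
      = xs.filter (mcNone modes) := by
  induction modes generalizing xs with
  | nil =>
      exact (List.filter_eq_self.mpr (by intro x _; simp [mcNone])).symm
  | cons m ms ih =>
      simp only [List.foldl_cons, ih, List.filter_filter]
      congr 1
      funext l
      simp [mcNone, Bool.and_comm]

-- ===== VERDICT (by name: the statement is the Claim_ definition above) =====
theorem mode_counter_spec : Claim_equal_mode_counter := by
  intro lines modes _
  unfold Spec_mode_counter mode_counter mode_counter_alt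
  rw [mcLoop_eq, foldl_filter_eq]
  ring
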